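-- pv_equiv track=rewrite | github.com/avijstein/advent-of-code | 2020/src/day6.py | short_dictionary
-- ===== SOURCE A (Python) =====
-- def short_dictionary(form, people):
--     dict, common_declarations = {}, 0
--     for i in form:
--         dict[i] = dict.get(i,0) + 1
--
--     for key in dict:
--         if dict[key] == people:
--             common_declarations += 1
--
--     return common_declarations
-- ===== SOURCE B (Python) =====
-- def short_dictionary(form, people):
--     def runs(s):
--         if not s:
--             return 0
--         k = 1
--         while k < len(s) and s[k] == s[0]:
--             k += 1
--         return (1 if k == people else 0) + runs(s[k:])
--     return runs(sorted(form))
-- ===== Notes on version B (the rewrite author's own statement) =====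
-- stated objective: alternative
-- what changed: Replaces the hash-map frequency table by sort-then-scan: sort the characters, then recursively walk the sorted list skipping each run of equal characters, counting the runs whose length equals people.
import Mathlib
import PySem

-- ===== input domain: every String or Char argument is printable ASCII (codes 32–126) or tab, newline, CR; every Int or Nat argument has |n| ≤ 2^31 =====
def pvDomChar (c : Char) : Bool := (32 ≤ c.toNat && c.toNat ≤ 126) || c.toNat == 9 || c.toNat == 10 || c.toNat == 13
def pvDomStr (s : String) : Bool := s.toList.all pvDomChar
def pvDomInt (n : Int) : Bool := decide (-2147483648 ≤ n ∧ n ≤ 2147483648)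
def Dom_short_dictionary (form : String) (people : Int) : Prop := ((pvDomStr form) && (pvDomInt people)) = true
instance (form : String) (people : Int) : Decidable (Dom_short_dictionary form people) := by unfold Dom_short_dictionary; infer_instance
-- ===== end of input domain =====

-- B replaces A's frequency dict by sort-then-scan-runs: sort the characters, recursively
-- skip each run of equal characters, counting the runs whose length equals `people`.

-- ===== PORT A =====
def short_dictionary (form : String) (people : Int) : Int :=
  let d := form.toList.foldl (fun d i => d.insert i (d.getD i 0 + 1)) PySem.Dict.empty
  d.keys.foldl (fun acc key => if d.getD key 0 == people then acc + 1 else acc) 0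

-- ===== PORT B =====
-- `runs` in Source B: the inner while advancing k over the leading run is takeWhile/dropWhile;
-- the recursive call on s[k:] is the call on the dropWhile remainder.
def pvRuns (people : Int) : List Char → Int
  | [] => 0
  | c :: rest =>
      let run := rest.takeWhile (fun x => x == c)
      let t := rest.dropWhile (fun x => x == c)
      (if ((run.length : Int) + 1) == people then (1 : Int) else 0) + pvRuns people t
termination_by s => s.length
decreasing_by
  simp only [List.length_cons]
  exact Nat.lt_succ_of_le (List.length_dropWhile_le _ _)

def short_dictionary_alt (form : String) (people : Int) : Int :=
  pvRuns people (PySem.List.sorted form.toList (fun x => x) false)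

-- ===== PRECONDITION & SPEC =====
def Spec_short_dictionary (form : String) (people : Int) (out : Int) : Prop := out = short_dictionary_alt form people
instance (form : String) (people : Int) (out : Int) : Decidable (Spec_short_dictionary form people out) := by unfold Spec_short_dictionary; infer_instance

-- ===== CLAIM (what is proved, stated in full; the proofs are below) =====
def Claim_equal_short_dictionary : Prop := ∀ (form : String) (people : Int), Dom_short_dictionary form people → Spec_short_dictionary form people (short_dictionary form people)

-- ===== LEMMAS AND PROOFS =====

-- the common intermediate value: sum of indicators over the distinct characters
def pvSum (cs : List Char) (p : Int) : Int :=
  ((PySem.Set.ofList cs).map (fun c => if ((cs.count c : Int) == p) then (1 : Int) else 0)).sum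

theorem a_eq_sum (cs : List Char) (p : Int) :
    (let d := cs.foldl (fun d i => d.insert i (d.getD i 0 + 1)) PySem.Dict.empty
     d.keys.foldl (fun acc key => if d.getD key 0 == p then acc + 1 else acc) 0) = pvSum cs p := by
  unfold pvSum
  simp only [PySem.Dict.foldl_insert_getD_add_one_eq_counter, PySem.Dict.keys_counter,
    PySem.Dict.getD_counter, PySem.List.foldl_if_add_one, PySem.List.sum_map_ite_one_zero]
  simp

theorem runs_eq_sum (p : Int) (s : List Char) (hs : s.Pairwise (· ≤ ·)) :
    pvRuns p s = pvSum s p := by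
  induction hn : s.length using Nat.strong_induction_on generalizing s with
  | _ n ih =>
  match s, hs with
  | [], _ => simp [pvRuns, pvSum, PySem.Set.ofList]
  | c :: rest, hs =>
    subst hn
    set r := rest.takeWhile (fun x => x == c) with hr_def
    set t := rest.dropWhile (fun x => x == c) with ht_def
    have hrt : r ++ t = rest := List.takeWhile_append_dropWhile
    have hle : ∀ x ∈ rest, c ≤ x := (List.pairwise_cons.mp hs).1
    have htp : t.Pairwise (· ≤ ·) :=
      ((List.pairwise_cons.mp hs).2).sublist (List.dropWhile_sublist _)
    have hrall : ∀ x ∈ r, x = c := by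
      intro x hx
      have := List.mem_takeWhile_imp hx
      simpa using this
    have hct : c ∉ t := by
      intro hc
      cases hty : t with
      | nil => simp [hty] at hc
      | cons y t' =>
        have hy : ¬ (y == c) = true := by
          have := List.head?_dropWhile_not (fun x => x == c) rest
          rw [← ht_def, hty] at this
          simpa using this
        have hyne : y ≠ c := by simpa using hy
        have hyrest : y ∈ rest := by
          rw [← hrt, hty]; exact List.mem_append_right _ (by simp)
        have hcy : c ≤ y := hle y hyrest
        have hyc : y ≤ c := by
          rw [hty] at hc
          rcases List.mem_cons.mp hc with h | h
          · exact le_of_eq h.symm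
          · rw [hty] at htp
            exact (List.pairwise_cons.mp htp).1 c h
        exact hyne (le_antisymm hyc hcy)
    have hcount_c : (c :: rest).count c = r.length + 1 := by
      have h1 : r.count c = r.length := List.count_eq_length.mpr (by
        intro b hb; exact ((hrall b hb).symm : c = b))
      have h2 : t.count c = 0 := List.count_eq_zero.mpr hct
      rw [List.count_cons_self, ← hrt, List.count_append, h1, h2]
    have hcount_d : ∀ d, d ≠ c → (c :: rest).count d = t.count d := by
      intro d hd
      have h1 : r.count d = 0 := List.count_eq_zero.mpr (by
        intro hdr; exact hd (hrall d hdr))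
      rw [List.count_cons_of_ne (Ne.symm hd), ← hrt, List.count_append, h1, Nat.zero_add]
    have hperm : (PySem.Set.ofList (c :: rest)).Perm (c :: PySem.Set.ofList t) := by
      apply (List.perm_ext_iff_of_nodup (PySem.Set.nodup_ofList _) ?_).mpr
      · intro a
        simp only [PySem.Set.mem_ofList, List.mem_cons]
        constructor
        · rintro (h | h)
          · exact Or.inl h
          · rw [← hrt] at h
            rcases List.mem_append.mp h with h | h
            · exact Or.inl (hrall a h)
            · exact Or.inr h
        · rintro (h | h)
          · exact Or.inl h
          · refine Or.inr ?_
            rw [← hrt]; exact List.mem_append_right _ h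
      · exact List.nodup_cons.mpr ⟨by simpa [PySem.Set.mem_ofList] using hct,
          PySem.Set.nodup_ofList _⟩
    have hlen : t.length < (c :: rest).length := by
      simp only [List.length_cons]
      exact Nat.lt_succ_of_le (List.length_dropWhile_le _ _)
    have hIH : pvRuns p t = pvSum t p := ih t.length hlen t htp rfl
    have hsum : pvSum (c :: rest) p
        = (if (((c :: rest).count c : Int) == p) then (1 : Int) else 0)
          + ((PySem.Set.ofList t).map
              (fun d => if (((c :: rest).count d : Int) == p) then (1 : Int) else 0)).sum := by
      unfold pvSum
      rw [(hperm.map _).sum_eq]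
      simp [List.map_cons, List.sum_cons]
    have hmapt : ((PySem.Set.ofList t).map
          (fun d => if (((c :: rest).count d : Int) == p) then (1 : Int) else 0)).sum
        = pvSum t p := by
      unfold pvSum
      congr 1
      apply List.map_congr_left
      intro d hd
      have hdt : d ∈ t := (PySem.Set.mem_ofList _ _).mp hd
      have hdc : d ≠ c := fun h => hct (h ▸ hdt)
      rw [hcount_d d hdc]
    rw [show pvRuns p (c :: rest)
        = (if ((r.length : Int) + 1) == p then (1 : Int) else 0) + pvRuns p t from by
          rw [pvRuns]]
    rw [hIH, hsum, hmapt, hcount_c]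
    push_cast
    ring_nf

theorem sum_perm (cs ds : List Char) (p : Int) (h : cs.Perm ds) : pvSum cs p = pvSum ds p := by
  unfold pvSum
  have hmem : ∀ a, a ∈ PySem.Set.ofList cs ↔ a ∈ PySem.Set.ofList ds := by
    intro a; simp only [PySem.Set.mem_ofList]; exact ⟨fun hx => h.mem_iff.mp hx, fun hx => h.mem_iff.mpr hx⟩
  have hperm : (PySem.Set.ofList cs).Perm (PySem.Set.ofList ds) :=
    (List.perm_ext_iff_of_nodup (PySem.Set.nodup_ofList cs) (PySem.Set.nodup_ofList ds)).mpr hmem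
  have hcnt : ∀ c : Char, cs.count c = ds.count c := fun c => h.count_eq c
  calc ((PySem.Set.ofList cs).map (fun c => if ((cs.count c : Int) == p) then (1 : Int) else 0)).sum
      = ((PySem.Set.ofList cs).map (fun c => if ((ds.count c : Int) == p) then (1 : Int) else 0)).sum := by
        simp only [hcnt]
    _ = ((PySem.Set.ofList ds).map (fun c => if ((ds.count c : Int) == p) then (1 : Int) else 0)).sum :=
        (hperm.map _).sum_eq

-- ===== VERDICT (by name: the statement is the Claim_ definition above) =====
theorem short_dictionary_spec : Claim_equal_short_dictionary := by
  intro form people _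
  unfold Spec_short_dictionary short_dictionary short_dictionary_alt
  rw [a_eq_sum,
    runs_eq_sum people _ (PySem.List.sorted_pairwise form.toList (fun x => x) ),
    sum_perm _ _ people (PySem.List.sorted_perm form.toList (fun x => x) false)]
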